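-- pv_equiv track=rewrite | github.com/KertAles/Adventures-of-Gargamel | catkin_ws/src/exercise6/get_colors/color_recognition.py | getGeneralPlotData
-- ===== SOURCE A (Python) =====
-- def getGeneralPlotData(general_color_names, label_counts):
--         na = r = y = g = b = 0
--         i = 0
--
--         for name in general_color_names:
--             if name == "Red":
--                 r += label_counts[i]
--             if name == "Yellow":
--                 y += label_counts[i]
--             if name == "Green":
--                 g += label_counts[i]
--             if name == "Blue":
--                 b += label_counts[i]
--             if name == "N/A":
--                 na += label_counts[i]
--             i += 1
--
--         color = [["Red", r], ["Yellow", y], ["Green", g], ["Blue", b]]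
--
--         if (r == y == g == b == 0):
--             color.append(["N/A", na])
--
--         return max(color, key=lambda item: item[1])
-- ===== SOURCE B (Python) =====
-- def getGeneralPlotData(general_color_names, label_counts):
--     def total(c):
--         return sum(label_counts[i] for i in range(len(general_color_names))
--                    if general_color_names[i] == c)
--
--     color = [[c, total(c)] for c in ["Red", "Yellow", "Green", "Blue"]]
--
--     if all(v == 0 for _, v in color):
--         color.append(["N/A", total("N/A")])
--
--     return max(color, key=lambda item: item[1])
-- ===== Notes on version B (the rewrite author's own statement) =====
-- stated objective: alternative
-- what changed: A's single indexed loop carrying five accumulators is replaced by an independent filtered-sum pass over the names per colour (Red/Yellow/Green/Blue, plus a lazy N/A pass only on the all-zero tie), keeping the same colour list and first-maximum tie order.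
import Mathlib
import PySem

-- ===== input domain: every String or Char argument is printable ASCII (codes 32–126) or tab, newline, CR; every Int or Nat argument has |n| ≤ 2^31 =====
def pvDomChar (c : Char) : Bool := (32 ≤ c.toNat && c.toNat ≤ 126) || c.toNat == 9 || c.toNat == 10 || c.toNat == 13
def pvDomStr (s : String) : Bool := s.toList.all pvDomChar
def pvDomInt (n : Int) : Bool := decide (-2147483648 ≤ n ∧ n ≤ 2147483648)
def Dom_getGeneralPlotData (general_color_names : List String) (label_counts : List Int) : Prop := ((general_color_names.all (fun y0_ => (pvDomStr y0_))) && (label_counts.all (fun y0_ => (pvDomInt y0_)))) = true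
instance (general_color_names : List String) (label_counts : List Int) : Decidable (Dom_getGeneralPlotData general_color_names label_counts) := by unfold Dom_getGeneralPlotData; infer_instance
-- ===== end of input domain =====

-- B replaces A's single five-accumulator indexed loop by an independent filtered-sum pass per
-- colour (objective: alternative decomposition, same asymptotic cost).

-- ===== PORT A =====
-- loop body of A's for-loop: state (na, r, y, g, b, i), five independent `if`s, then i += 1
def pvStepA (counts : List Int) (st : Int × Int × Int × Int × Int × Int) (name : String) :
    Int × Int × Int × Int × Int × Int :=
  match st with
  | (na, r, y, g, b, i) =>
    ((if name == "N/A" then na + PySem.List.pyGetD counts i 0 else na),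
     (if name == "Red" then r + PySem.List.pyGetD counts i 0 else r),
     (if name == "Yellow" then y + PySem.List.pyGetD counts i 0 else y),
     (if name == "Green" then g + PySem.List.pyGetD counts i 0 else g),
     (if name == "Blue" then b + PySem.List.pyGetD counts i 0 else b),
     i + 1)

def getGeneralPlotData (general_color_names : List String) (label_counts : List Int) : String × Int :=
  match general_color_names.foldl (pvStepA label_counts) (0, 0, 0, 0, 0, 0) with
  | (na, r, y, g, b, _) =>
    let color : List (String × Int) := [("Red", r), ("Yellow", y), ("Green", g), ("Blue", b)]
    let color := if r == y && y == g && g == b && b == 0 then color ++ [("N/A", na)] else color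
    (PySem.List.max? color (fun item => item.2)).getD ("", 0)

-- ===== PORT B =====
-- total(c) = sum(label_counts[i] for i in range(len(general_color_names)) if general_color_names[i] == c)
def pvTotal (general_color_names : List String) (label_counts : List Int) (c : String) : Int :=
  (((PySem.List.pyRange 0 (PySem.List.len general_color_names) 1).filter
      (fun i => PySem.List.pyGetD general_color_names i "" == c)).map
      (fun i => PySem.List.pyGetD label_counts i 0)).sum

def getGeneralPlotData_alt (general_color_names : List String) (label_counts : List Int) : String × Int :=
  let color : List (String × Int) :=
    (["Red", "Yellow", "Green", "Blue"]).map (fun c => (c, pvTotal general_color_names label_counts c))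
  let color := if color.all (fun p => p.2 == 0)
    then color ++ [("N/A", pvTotal general_color_names label_counts "N/A")] else color
  (PySem.List.max? color (fun item => item.2)).getD ("", 0)

-- ===== PRECONDITION & SPEC =====
-- Pre_ excludes exactly the inputs where Python A raises IndexError: a colour name at position i
-- with i out of range of label_counts.
def Pre_getGeneralPlotData (general_color_names : List String) (label_counts : List Int) : Prop :=
  ∀ i ∈ List.range general_color_names.length,
    general_color_names.getD i "" ∈ (["Red", "Yellow", "Green", "Blue", "N/A"] : List String) →
      i < label_counts.length
instance (general_color_names : List String) (label_counts : List Int) : Decidable (Pre_getGeneralPlotData general_color_names label_counts) := by unfold Pre_getGeneralPlotData; infer_instance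

def pvWitness_getGeneralPlotData : List String × List Int := (["Red", "Blue", "Pink"], [2, 3])

def Spec_getGeneralPlotData (general_color_names : List String) (label_counts : List Int) (out : String × Int) : Prop := out = getGeneralPlotData_alt general_color_names label_counts
instance (general_color_names : List String) (label_counts : List Int) (out : String × Int) : Decidable (Spec_getGeneralPlotData general_color_names label_counts out) := by unfold Spec_getGeneralPlotData; infer_instance

-- ===== CLAIM (what is proved, stated in full; the proofs are below) =====
def Claim_equal_getGeneralPlotData : Prop := ∀ (general_color_names : List String) (label_counts : List Int), Dom_getGeneralPlotData general_color_names label_counts → Pre_getGeneralPlotData general_color_names label_counts → Spec_getGeneralPlotData general_color_names label_counts (getGeneralPlotData general_color_names label_counts)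

-- ===== LEMMAS AND PROOFS =====

-- per-colour structural sum over a suffix of the names, counts indexed from `off`
def pvTSum (c : String) (suf : List String) (counts : List Int) (off : Nat) : Int :=
  match suf with
  | [] => 0
  | n :: rest => (if n == c then PySem.List.pyGetD counts (off : Int) 0 else 0) + pvTSum c rest counts (off + 1)

lemma loopA_eq (counts : List Int) (suf : List String) :
    ∀ (na r y g b : Int) (off : Nat),
      suf.foldl (pvStepA counts) (na, r, y, g, b, (off : Int)) =
        (na + pvTSum "N/A" suf counts off, r + pvTSum "Red" suf counts off,
         y + pvTSum "Yellow" suf counts off, g + pvTSum "Green" suf counts off,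
         b + pvTSum "Blue" suf counts off, ((off + suf.length : Nat) : Int)) := by
  induction suf with
  | nil => intro na r y g b off; simp [pvTSum]
  | cons n rest ih =>
    intro na r y g b off
    have hstep : ((off : Int) + 1) = ((off + 1 : Nat) : Int) := by push_cast; ring
    simp only [List.foldl_cons, pvStepA, hstep, ih]
    simp [pvTSum]
    and_intros <;> first | (split <;> ring) | omega

lemma totalB_eq (counts : List Int) (c : String) (suf : List String) :
    ∀ (pre : List String),
      (((PySem.List.pyRange (pre.length : Int) ((pre.length + suf.length : Nat) : Int) 1).filter
          (fun i => PySem.List.pyGetD (pre ++ suf) i "" == c)).map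
          (fun i => PySem.List.pyGetD counts i 0)).sum = pvTSum c suf counts pre.length := by
  induction suf with
  | nil => intro pre; simp [PySem.List.pyRange, pvTSum]
  | cons n rest ih =>
    intro pre
    have hlt : (pre.length : Int) < ((pre.length + (n :: rest).length : Nat) : Int) := by
      simp
    rw [PySem.List.pyRange_one_cons hlt]
    have hhead : PySem.List.pyGetD (pre ++ n :: rest) (pre.length : Int) "" = n := by
      simp [PySem.List.pyGetD_natCast, List.getD]
    have hpre' : ((pre ++ [n]).length : Int) = (pre.length : Int) + 1 := by simp
    have hbound : (((pre ++ [n]).length + rest.length : Nat) : Int) =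
        ((pre.length + (n :: rest).length : Nat) : Int) := by simp; omega
    have hlist : (pre ++ [n]) ++ rest = pre ++ n :: rest := by simp
    have := ih (pre ++ [n])
    rw [hpre', hbound, hlist] at this
    simp only [List.filter_cons, hhead, List.length_append, List.length_singleton] at this ⊢
    by_cases h : n == c
    · simp only [h]
      simp only [List.map_cons, List.sum_cons, this, pvTSum, h, if_true]
    · simp only [h]
      simp only [Bool.false_eq_true, if_false, this, pvTSum, h, Bool.false_eq_true, if_false]
      omega

lemma pvTotal_eq (names : List String) (counts : List Int) (c : String) :
    pvTotal names counts c = pvTSum c names counts 0 := by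
  have := totalB_eq counts c names ([] : List String)
  simpa [pvTotal, PySem.List.len_eq] using this

lemma cond_eq (r y g b : Int) :
    (r == y && y == g && g == b && b == 0) = (r == 0 && (y == 0 && (g == 0 && (b == 0 && true)))) := by
  rw [Bool.eq_iff_iff]
  simp only [Bool.and_eq_true, beq_iff_eq, and_true]
  constructor <;> intro h <;> omega

-- ===== VERDICT (by name: the statement is the Claim_ definition above) =====
theorem getGeneralPlotData_spec : Claim_equal_getGeneralPlotData := by
  intro names counts _hdom _hpre
  unfold Spec_getGeneralPlotData getGeneralPlotData getGeneralPlotData_alt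
  have h := loopA_eq counts names 0 0 0 0 0 0
  norm_num at h
  rw [h]
  simp only [List.map_cons, List.map_nil, pvTotal_eq, List.all_cons, List.all_nil]
  rw [cond_eq]
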